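-- pv_equiv track=rewrite | github.com/team-mirai-volunteer/rs-vis | scripts/score-project-quality.py | calc_redelegation_depth
-- ===== SOURCE A (Python) =====
-- import collections
--
-- def calc_redelegation_depth(pid_links):
--     """BFSでルート（担当組織からの支出=TRUE）からの最大深度を算出"""
--     children = collections.defaultdict(list)
--     roots = set()
--     for src, dst, from_org in pid_links:
--         if from_org:
--             roots.add(dst)
--         else:
--             children[src].append(dst)
--     if not roots:
--         return 0
--     max_depth = 0
--     visited = set()
--     queue = collections.deque((r, 0) for r in roots)
--     while queue:
--         node, depth = queue.popleft()
--         if node in visited: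
--             continue
--         visited.add(node)
--         max_depth = max(max_depth, depth)
--         for child in children.get(node, []):
--             queue.append((child, depth + 1))
--     return max_depth
-- ===== SOURCE B (Python) =====
-- def calc_redelegation_depth(pid_links):
--     """Bellman-Ford style: relax every non-org edge len(edges) times; answer = max distance."""
--     dist = {}
--     edges = []
--     for src, dst, from_org in pid_links:
--         if from_org:
--             dist[dst] = 0
--         else:
--             edges.append((src, dst))
--     if not dist:
--         return 0
--     for _ in range(len(edges)):
--         for src, dst in edges:
--             if src in dist:
--                 d = dist[src] + 1
--                 if dst not in dist or d < dist[dst]: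
--                     dist[dst] = d
--     return max(dist.values())
-- ===== Notes on version B (the rewrite author's own statement) =====
-- stated objective: alternative
-- what changed: Replaces the BFS traversal (adjacency dict + visited set + (node,depth) deque) by Bellman-Ford-style relaxation: a distance dict seeded with 0 at org-edge targets is relaxed over the raw non-org edge list len(edges) times and the answer is the maximum stored distance; no adjacency dict, queue or visited set exists.
import Mathlib
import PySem

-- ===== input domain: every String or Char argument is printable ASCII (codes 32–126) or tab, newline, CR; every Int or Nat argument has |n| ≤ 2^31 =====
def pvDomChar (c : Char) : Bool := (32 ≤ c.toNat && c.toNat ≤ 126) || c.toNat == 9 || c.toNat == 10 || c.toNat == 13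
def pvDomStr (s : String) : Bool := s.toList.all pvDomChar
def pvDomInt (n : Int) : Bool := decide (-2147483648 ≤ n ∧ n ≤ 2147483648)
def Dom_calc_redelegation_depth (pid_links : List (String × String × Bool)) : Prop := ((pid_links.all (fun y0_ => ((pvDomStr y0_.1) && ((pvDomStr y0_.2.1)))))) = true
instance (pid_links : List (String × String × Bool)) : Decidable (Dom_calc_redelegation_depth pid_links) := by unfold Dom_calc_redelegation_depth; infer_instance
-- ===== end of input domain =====

-- B replaces A's BFS traversal (adjacency dict + visited set + (node, depth) deque) by Bellman-Ford-style
-- relaxation over the raw edge list; same return value, no speed claim (B is an alternative algorithm).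
-- A's queue is seeded by iterating the Python set `roots`; the returned maximum depth does not depend on
-- that iteration order, and the port seeds the queue in the set's insertion order (PySem.Set).

-- ===== PORT A =====

-- potential used only as the termination measure of A's BFS loop:
-- queue length + total number of children hanging off not-yet-visited keys
def pvS (items : List (String × List String)) (vis : PySem.Set String) : Nat :=
  ((items.filter (fun kv => !(PySem.Set.contains vis kv.1))).map (fun kv => kv.2.length)).sum

lemma pvSumFilterLe (l : List (String × List String)) (p q : String × List String → Bool)
    (h : ∀ kv, p kv = true → q kv = true) :
    ((l.filter p).map (fun kv => kv.2.length)).sum ≤ ((l.filter q).map (fun kv => kv.2.length)).sum := by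
  have hs : (l.filter p).Sublist (l.filter q) := List.monotone_filter_right l h
  exact List.Sublist.sum_le_sum (hs.map _) (by simp)

lemma pvContains_add (vis : PySem.Set String) (x k : String) :
    PySem.Set.contains (PySem.Set.add vis x) k = (PySem.Set.contains vis k || decide (k = x)) := by
  have hm := PySem.Set.mem_add vis x k
  by_cases hk : k ∈ vis.add x <;> by_cases h1 : k ∈ vis <;> by_cases h2 : k = x <;>
    simp_all [PySem.Set.contains]

lemma pvS_mono (l : List (String × List String)) (vis : PySem.Set String) (x : String) :
    pvS l (PySem.Set.add vis x) ≤ pvS l vis := by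
  apply pvSumFilterLe
  intro kv hp
  rw [pvContains_add] at hp
  cases hc : PySem.Set.contains vis kv.1 <;> simp_all

lemma pvS_add_list (l : List (String × List String)) (vis : PySem.Set String) (x : String)
    (h : PySem.Set.contains vis x = false) :
    pvS l (PySem.Set.add vis x) + ((PySem.Dict.mk l).getD x []).length ≤ pvS l vis := by
  induction l with
  | nil => simp [pvS, PySem.Dict.getD, PySem.Dict.get?]
  | cons kv rest ih =>
      obtain ⟨k, v⟩ := kv
      rw [PySem.Dict.getD_eq_get?_getD, PySem.Dict.get?_mk_cons]
      by_cases hkx : k = x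
      · subst hkx
        have h1 : (!PySem.Set.contains (PySem.Set.add vis k) k) = false := by
          rw [pvContains_add]; simp
        have h2 : (!PySem.Set.contains vis k) = true := by rw [h]; rfl
        have hmono := pvS_mono rest vis k
        simp only [pvS, List.filter_cons, h1, h2, Bool.false_eq_true, if_false, if_true,
          List.map_cons, List.sum_cons, BEq.rfl, Option.getD_some] at *
        omega
      · have hbk : (k == x) = false := by simp [hkx]
        have hck : PySem.Set.contains (PySem.Set.add vis x) k = PySem.Set.contains vis k := by
          rw [pvContains_add]; simp [hkx]
        rw [PySem.Dict.getD_eq_get?_getD] at ih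
        cases hk : PySem.Set.contains vis k <;>
          simp_all [pvS] <;> omega

lemma pvS_add (ch : PySem.Dict String (List String)) (vis : PySem.Set String) (x : String)
    (h : PySem.Set.contains vis x = false) :
    pvS ch.items (PySem.Set.add vis x) + (PySem.Dict.getD ch x []).length ≤ pvS ch.items vis := by
  have := pvS_add_list ch.items vis x h
  rwa [show PySem.Dict.mk ch.items = ch from rfl] at this

-- A's `while queue` loop, step for step ((node, depth) pairs popped from the front)
def pvLoopA (ch : PySem.Dict String (List String)) :
    List (String × Int) → PySem.Set String → Int → Int
  | [], _, maxd => maxd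
  | (node, depth) :: rest, vis, maxd =>
    if PySem.Set.contains vis node then pvLoopA ch rest vis maxd
    else
      pvLoopA ch (rest ++ (PySem.Dict.getD ch node []).map (fun c => (c, depth + 1)))
        (PySem.Set.add vis node) (max maxd depth)
  termination_by q vis _ => q.length + pvS ch.items vis
  decreasing_by
  · simp only [List.length_cons]; omega
  · have hfalse : PySem.Set.contains vis node = false := by simp_all
    have := pvS_add ch vis node hfalse
    simp only [List.length_append, List.length_cons, List.length_map]
    omega

def calc_redelegation_depth (pid_links : List (String × String × Bool)) : Int :=
  let st := pid_links.foldl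
    (fun (st : PySem.Dict String (List String) × PySem.Set String) l =>
      if l.2.2 then (st.1, PySem.Set.add st.2 l.2.1)
      else (st.1.modify l.1 [] (· ++ [l.2.1]), st.2))
    (PySem.Dict.empty, PySem.Set.empty)
  if st.2 = [] then 0
  else pvLoopA st.1 (st.2.map (fun r => (r, (0 : Int)))) PySem.Set.empty 0

-- ===== PORT B =====

-- one relaxation: `if src in dist: d = dist[src] + 1; if dst not in dist or d < dist[dst]: dist[dst] = d`
def pvRelax (dist : PySem.Dict String Int) (e : String × String) : PySem.Dict String Int :=
  match dist.get? e.1 with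
  | none => dist
  | some v =>
    let d := v + 1
    match dist.get? e.2 with
    | none => dist.insert e.2 d
    | some w => if d < w then dist.insert e.2 d else dist

def calc_redelegation_depth_alt (pid_links : List (String × String × Bool)) : Int :=
  let st := pid_links.foldl
    (fun (st : PySem.Dict String Int × List (String × String)) l =>
      if l.2.2 then (st.1.insert l.2.1 0, st.2)
      else (st.1, st.2 ++ [(l.1, l.2.1)]))
    (PySem.Dict.empty, [])
  if st.1.items = [] then 0
  else
    let final := (List.range st.2.length).foldl (fun d _ => st.2.foldl pvRelax d) st.1
    -- max(dist.values()): dist is nonempty here, so Python's max returns; `.getD 0` is unreachable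
    (PySem.List.max? final.values (fun v => v)).getD 0

-- ===== PRECONDITION & SPEC =====
def Spec_calc_redelegation_depth (pid_links : List (String × String × Bool)) (out : Int) : Prop := out = calc_redelegation_depth_alt pid_links
instance (pid_links : List (String × String × Bool)) (out : Int) : Decidable (Spec_calc_redelegation_depth pid_links out) := by unfold Spec_calc_redelegation_depth; infer_instance

-- ===== CLAIM (what is proved, stated in full; the proofs are below) =====
def Claim_equal_calc_redelegation_depth : Prop := ∀ (pid_links : List (String × String × Bool)), Dom_calc_redelegation_depth pid_links → Spec_calc_redelegation_depth pid_links (calc_redelegation_depth pid_links)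

-- ===== LEMMAS AND PROOFS =====

-- ---------- abstract reachability: levels of the multi-source BFS / Bellman-Ford fixpoint ----------

def pvReach (R : List String) (E : List (String × String)) : Nat → String → Bool
  | 0, n => decide (n ∈ R)
  | k+1, n => pvReach R E k n || E.any (fun e => pvReach R E k e.1 && decide (e.2 = n))

lemma pvReach_succ_of (R : List String) (E : List (String × String)) (k : Nat) (n : String)
    (h : pvReach R E k n = true) : pvReach R E (k+1) n = true := by
  simp [pvReach, h]

lemma pvReach_le (R : List String) (E : List (String × String)) {k j : Nat} (hkj : k ≤ j)
    {n : String} (h : pvReach R E k n = true) : pvReach R E j n = true := by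
  induction j with
  | zero => simpa [Nat.le_zero.mp hkj] using h
  | succ j ih =>
      rcases Nat.lt_or_ge k (j+1) with hlt | hge
      · exact pvReach_succ_of R E j n (ih (Nat.lt_succ_iff.mp hlt))
      · simpa [Nat.le_antisymm hkj hge] using h

lemma pvReach_new_mem (R : List String) (E : List (String × String)) (k : Nat) (n : String)
    (h1 : pvReach R E (k+1) n = true) (h0 : pvReach R E k n = false) :
    n ∈ E.map (·.2) := by
  simp only [pvReach, h0, Bool.false_or, List.any_eq_true] at h1
  obtain ⟨e, he, hp⟩ := h1
  simp only [Bool.and_eq_true, decide_eq_true_eq] at hp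
  exact List.mem_map.mpr ⟨e, he, hp.2⟩

def pvStable (R : List String) (E : List (String × String)) (k : Nat) : Prop :=
  ∀ n, pvReach R E (k+1) n = pvReach R E k n

lemma pvReach_succ_eq (R : List String) (E : List (String × String)) (k : Nat) (n : String) :
    pvReach R E (k+1) n = (pvReach R E k n || E.any (fun e => pvReach R E k e.1 && decide (e.2 = n))) := rfl

lemma pvStable_succ (R : List String) (E : List (String × String)) (k : Nat)
    (h : pvStable R E k) : pvStable R E (k+1) := by
  intro n
  have ha : E.any (fun e => pvReach R E (k+1) e.1 && decide (e.2 = n))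
      = E.any (fun e => pvReach R E k e.1 && decide (e.2 = n)) :=
    PySem.List.any_congr_mem (fun e _ => by rw [h e.1])
  rw [pvReach_succ_eq R E (k+1) n, pvReach_succ_eq R E k n, ha]
  simp [Bool.or_assoc]

lemma pvStable_all_ge (R : List String) (E : List (String × String)) {k j : Nat}
    (h : pvStable R E k) (hkj : k ≤ j) : pvStable R E j := by
  induction j, hkj using Nat.le_induction with
  | base => exact h
  | succ j hj ih => exact pvStable_succ R E j ih

lemma pvStable_ge (R : List String) (E : List (String × String)) {k j : Nat}
    (h : pvStable R E k) (hkj : k ≤ j) : ∀ n, pvReach R E j n = pvReach R E k n := by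
  induction j, hkj using Nat.le_induction with
  | base => intro n; rfl
  | succ j hj ih => intro n; rw [pvStable_all_ge R E h hj n, ih n]

lemma pvFilterLt {α : Type} {l : List α} {p q : α → Bool} (hpq : ∀ a, p a = true → q a = true)
    {x : α} (hx : x ∈ l) (hqx : q x = true) (hpx : p x = false) :
    (l.filter p).length < (l.filter q).length := by
  have hs : (l.filter p).Sublist (l.filter q) := List.monotone_filter_right l hpq
  rcases Nat.lt_or_ge (l.filter p).length (l.filter q).length with h | h
  · exact h
  · exfalso
    have heq : l.filter p = l.filter q := hs.eq_of_length (le_antisymm hs.length_le h)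
    have hmem : x ∈ l.filter p := heq ▸ List.mem_filter.mpr ⟨hx, hqx⟩
    rw [List.mem_filter, hpx] at hmem
    simp at hmem

lemma pvExistsStable (R : List String) (E : List (String × String)) :
    ∃ k, k ≤ E.length ∧ pvStable R E k := by
  by_contra hcon
  push_neg at hcon
  have grow : ∀ k, k ≤ E.length + 1 →
      k ≤ (((E.map (·.2)).dedup).filter (fun n => pvReach R E k n)).length := by
    intro k
    induction k with
    | zero => intro _; exact Nat.zero_le _
    | succ k ih =>
        intro hk
        have hk' : k ≤ E.length := by omega
        have hns : ¬ pvStable R E k := hcon k hk'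
        unfold pvStable at hns
        push_neg at hns
        obtain ⟨n, hn⟩ := hns
        have hr : pvReach R E (k+1) n = true ∧ pvReach R E k n = false := by
          cases h1 : pvReach R E (k+1) n <;> cases h2 : pvReach R E k n
          · simp_all
          · exact absurd (pvReach_succ_of R E k n h2) (by simp [h1])
          · exact ⟨rfl, rfl⟩
          · simp_all
        obtain ⟨ht, hf⟩ := hr
        have hmem : n ∈ (E.map (·.2)).dedup := List.mem_dedup.mpr (pvReach_new_mem R E k n ht hf)
        have hlt := pvFilterLt (l := (E.map (·.2)).dedup)
          (p := fun m => pvReach R E k m) (q := fun m => pvReach R E (k+1) m)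
          (fun a ha => pvReach_succ_of R E k a ha) hmem ht hf
        have hih := ih (by omega)
        omega
  have hbig := grow (E.length + 1) le_rfl
  have hle : (((E.map (·.2)).dedup).filter (fun n => pvReach R E (E.length+1) n)).length
      ≤ ((E.map (·.2)).dedup).length := List.length_filter_le _ _
  have hDlen : ((E.map (·.2)).dedup).length ≤ E.length := by
    have h1 : ((E.map (·.2)).dedup).length ≤ (E.map (·.2)).length :=
      (List.dedup_sublist _).length_le
    simpa using h1
  omega

noncomputable def pvMS (R : List String) (E : List (String × String)) : Nat :=
  sInf {k | pvStable R E k}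

lemma pvMS_stable (R : List String) (E : List (String × String)) : pvStable R E (pvMS R E) := by
  obtain ⟨k, -, hk⟩ := pvExistsStable R E
  exact Nat.sInf_mem (⟨k, hk⟩ : Set.Nonempty {k | pvStable R E k})

lemma pvMS_le (R : List String) (E : List (String × String)) : pvMS R E ≤ E.length := by
  obtain ⟨k, hk1, hk2⟩ := pvExistsStable R E
  exact le_trans (Nat.sInf_le hk2) hk1

lemma pvMS_min (R : List String) (E : List (String × String)) {j : Nat} (hj : j < pvMS R E) :
    ¬ pvStable R E j := fun h => absurd (Nat.sInf_le h) (Nat.not_le.mpr hj)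

noncomputable def pvDelta (R : List String) (E : List (String × String)) (n : String) : Nat :=
  sInf {k | pvReach R E k n = true}

lemma pvDelta_reach (R : List String) (E : List (String × String)) {n : String} {k : Nat}
    (h : pvReach R E k n = true) : pvReach R E (pvDelta R E n) n = true :=
  Nat.sInf_mem (⟨k, h⟩ : Set.Nonempty {k | pvReach R E k n = true})

lemma pvDelta_le (R : List String) (E : List (String × String)) {n : String} {k : Nat}
    (h : pvReach R E k n = true) : pvDelta R E n ≤ k := Nat.sInf_le h

-- triangle inequality along an edge
lemma pvDelta_edge (R : List String) (E : List (String × String)) {s d : String}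
    (he : (s, d) ∈ E) {k : Nat} (hs : pvReach R E k s = true) :
    pvReach R E (k+1) d = true ∧ pvDelta R E d ≤ pvDelta R E s + 1 := by
  have step : ∀ {j : Nat}, pvReach R E j s = true → pvReach R E (j+1) d = true := by
    intro j hj
    rw [pvReach_succ_eq]
    refine Bool.or_eq_true_iff.mpr (Or.inr ?_)
    exact List.any_eq_true.mpr ⟨(s, d), he, by simp [hj]⟩
  refine ⟨step hs, ?_⟩
  exact pvDelta_le R E (step (pvDelta_reach R E hs))

-- every reachable node is reached by level pvMS
lemma pvReach_any_MS (R : List String) (E : List (String × String)) {n : String} {k : Nat}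
    (h : pvReach R E k n = true) : pvReach R E (pvMS R E) n = true := by
  rcases Nat.le_total k (pvMS R E) with hle | hge
  · exact pvReach_le R E hle h
  · rwa [pvStable_ge R E (pvMS_stable R E) hge n] at h

lemma pvDelta_le_MS (R : List String) (E : List (String × String)) {n : String} {k : Nat}
    (h : pvReach R E k n = true) : pvDelta R E n ≤ pvMS R E :=
  pvDelta_le R E (pvReach_any_MS R E h)

-- some node realizes depth pvMS (when roots are nonempty)
lemma pvMS_attained (R : List String) (E : List (String × String)) (hR : R ≠ []) :
    ∃ n, pvReach R E (pvMS R E) n = true ∧ pvDelta R E n = pvMS R E := by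
  cases hm : pvMS R E with
  | zero =>
      obtain ⟨r, hr⟩ := List.exists_mem_of_ne_nil R hR
      have h0 : pvReach R E 0 r = true := by simp [pvReach, hr]
      exact ⟨r, h0, Nat.le_zero.mp (by simpa [hm] using pvDelta_le R E h0)⟩
  | succ j =>
      have hns : ¬ pvStable R E j := pvMS_min R E (by omega)
      unfold pvStable at hns
      push_neg at hns
      obtain ⟨n, hn⟩ := hns
      have hr : pvReach R E (j+1) n = true ∧ pvReach R E j n = false := by
        cases h1 : pvReach R E (j+1) n <;> cases h2 : pvReach R E j n
        · simp_all
        · exact absurd (pvReach_succ_of R E j n h2) (by simp [h1])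
        · exact ⟨rfl, rfl⟩
        · simp_all
      obtain ⟨ht, hf⟩ := hr
      have hdle : pvDelta R E n ≤ j + 1 := pvDelta_le R E ht
      have hdge : j + 1 ≤ pvDelta R E n := by
        by_contra hc
        push_neg at hc
        have := pvReach_le R E (by omega : pvDelta R E n ≤ j) (pvDelta_reach R E ht)
        simp [hf] at this
      exact ⟨n, hm ▸ ht, by omega⟩

-- ---------- the builders of both programs, componentwise ----------

def pvChA (links : List (String × String × Bool)) : PySem.Dict String (List String) :=
  links.foldl (fun ch l => if l.2.2 then ch else ch.modify l.1 [] (· ++ [l.2.1])) PySem.Dict.empty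

def pvRts (links : List (String × String × Bool)) : PySem.Set String :=
  links.foldl (fun r l => if l.2.2 then PySem.Set.add r l.2.1 else r) PySem.Set.empty

def pvDist0 (links : List (String × String × Bool)) : PySem.Dict String Int :=
  links.foldl (fun d l => if l.2.2 then d.insert l.2.1 0 else d) PySem.Dict.empty

def pvEdges (links : List (String × String × Bool)) : List (String × String) :=
  links.foldl (fun E l => if l.2.2 then E else E ++ [(l.1, l.2.1)]) []

lemma pvSplitA (links : List (String × String × Bool)) :
    links.foldl
      (fun (st : PySem.Dict String (List String) × PySem.Set String) l =>
        if l.2.2 then (st.1, PySem.Set.add st.2 l.2.1)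
        else (st.1.modify l.1 [] (· ++ [l.2.1]), st.2))
      (PySem.Dict.empty, PySem.Set.empty)
    = (pvChA links, pvRts links) := by
  unfold pvChA pvRts
  suffices h : ∀ (ls : List (String × String × Bool)) (ch : PySem.Dict String (List String))
      (r : PySem.Set String),
      ls.foldl
        (fun (st : PySem.Dict String (List String) × PySem.Set String) l =>
          if l.2.2 then (st.1, PySem.Set.add st.2 l.2.1)
          else (st.1.modify l.1 [] (· ++ [l.2.1]), st.2)) (ch, r)
      = (ls.foldl (fun ch l => if l.2.2 then ch else ch.modify l.1 [] (· ++ [l.2.1])) ch,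
         ls.foldl (fun r l => if l.2.2 then PySem.Set.add r l.2.1 else r) r) from
    h links PySem.Dict.empty PySem.Set.empty
  intro ls
  induction ls with
  | nil => intro ch r; rfl
  | cons l rest ih =>
      intro ch r
      by_cases hl : l.2.2 = true <;> simp [List.foldl_cons, hl, ih]

lemma pvSplitB (links : List (String × String × Bool)) :
    links.foldl
      (fun (st : PySem.Dict String Int × List (String × String)) l =>
        if l.2.2 then (st.1.insert l.2.1 0, st.2)
        else (st.1, st.2 ++ [(l.1, l.2.1)]))
      (PySem.Dict.empty, [])
    = (pvDist0 links, pvEdges links) := by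
  unfold pvDist0 pvEdges
  suffices h : ∀ (ls : List (String × String × Bool)) (d : PySem.Dict String Int)
      (es : List (String × String)),
      ls.foldl
        (fun (st : PySem.Dict String Int × List (String × String)) l =>
          if l.2.2 then (st.1.insert l.2.1 0, st.2)
          else (st.1, st.2 ++ [(l.1, l.2.1)])) (d, es)
      = (ls.foldl (fun d l => if l.2.2 then d.insert l.2.1 0 else d) d,
         ls.foldl (fun es l => if l.2.2 then es else es ++ [(l.1, l.2.1)]) es) from
    h links PySem.Dict.empty []
  intro ls
  induction ls with
  | nil => intro d es; rfl
  | cons l rest ih =>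
      intro d es
      by_cases hl : l.2.2 = true <;> simp [List.foldl_cons, hl, ih]

lemma pvEdges_eq (links : List (String × String × Bool)) :
    pvEdges links = (links.filter (fun l => !l.2.2)).map (fun l => (l.1, l.2.1)) := by
  unfold pvEdges
  have hcongr : links.foldl (fun es l => if l.2.2 then es else es ++ [(l.1, l.2.1)]) []
      = links.foldl (fun es l => if (!l.2.2) = true then es ++ [(l.1, l.2.1)] else es) [] := by
    apply PySem.List.foldl_congr_mem
    intro acc l _
    by_cases hl : l.2.2 = true <;> simp [hl]
  rw [hcongr, PySem.List.foldl_append_if]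
  simp

lemma pvChA_getD (links : List (String × String × Bool)) (s : String) :
    (pvChA links).getD s [] = ((pvEdges links).filter (fun e => e.1 == s)).map (·.2) := by
  unfold pvChA
  have hcongr : links.foldl (fun ch l => if l.2.2 then ch else ch.modify l.1 [] (· ++ [l.2.1]))
        PySem.Dict.empty
      = links.foldl (fun ch l => if (!l.2.2) = true then ch.modify l.1 [] (· ++ [l.2.1]) else ch)
        PySem.Dict.empty := by
    apply PySem.List.foldl_congr_mem
    intro acc l _
    by_cases hl : l.2.2 = true <;> simp [hl]
  rw [hcongr, PySem.List.foldl_if_eq_foldl_filter]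
  have hmap : (links.filter (fun l => !l.2.2)).foldl
        (fun d l => d.modify l.1 [] (· ++ [l.2.1])) PySem.Dict.empty
      = ((links.filter (fun l => !l.2.2)).map (fun l => (l.1, l.2.1))).foldl
          (fun d p => d.modify p.1 [] (· ++ [p.2])) PySem.Dict.empty := by
    rw [List.foldl_map]
  rw [hmap, PySem.Dict.getD_foldl_modify_append, pvEdges_eq]
  simp

lemma pvAdj (links : List (String × String × Bool)) (s n : String) :
    n ∈ (pvChA links).getD s [] ↔ (s, n) ∈ pvEdges links := by
  rw [pvChA_getD]
  simp only [List.mem_map, List.mem_filter, beq_iff_eq]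
  constructor
  · rintro ⟨e, ⟨heE, h1⟩, h2⟩
    have he : e = (s, n) := by cases e; simp_all
    exact he ▸ heE
  · intro h
    exact ⟨(s, n), ⟨h, rfl⟩, rfl⟩

lemma pvMemContains' (s : PySem.Set String) (x : String) :
    PySem.Set.contains s x = true ↔ x ∈ s := by
  simp [PySem.Set.contains]

lemma pvDist0_keys (links : List (String × String × Bool)) :
    (pvDist0 links).keys = pvRts links := by
  unfold pvDist0 pvRts
  suffices h : ∀ (ls : List (String × String × Bool)) (d : PySem.Dict String Int)
      (r : PySem.Set String), d.keys = r →
      (ls.foldl (fun d l => if l.2.2 then d.insert l.2.1 0 else d) d).keys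
        = ls.foldl (fun r l => if l.2.2 then PySem.Set.add r l.2.1 else r) r from
    h links PySem.Dict.empty PySem.Set.empty (by simp)
  intro ls
  induction ls with
  | nil => intro d r h; exact h
  | cons l rest ih =>
      intro d r h
      by_cases hl : l.2.2 = true
      · simp only [List.foldl_cons, hl, if_true]
        apply ih
        by_cases hc : d.contains l.2.1 = true
        · have hmem : l.2.1 ∈ r := by
            rw [← h]; exact (PySem.Dict.contains_iff_mem_keys d l.2.1).mp hc
          have hsc : PySem.Set.contains r l.2.1 = true := (pvMemContains' r l.2.1).mpr hmem
          rw [PySem.Dict.keys_insert_of_contains _ _ hc, h]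
          simp [PySem.Set.add, hsc, hmem]
        · have hcf : d.contains l.2.1 = false := by simpa using hc
          have hmem : l.2.1 ∉ r := by
            rw [← h]
            intro hm
            exact hc ((PySem.Dict.contains_iff_mem_keys d l.2.1).mpr hm)
          have hsc : PySem.Set.contains r l.2.1 = false := by
            cases hx : PySem.Set.contains r l.2.1
            · rfl
            · exact absurd ((pvMemContains' r l.2.1).mp hx) hmem
          rw [PySem.Dict.keys_insert_of_not_contains _ _ hcf, h]
          simp [PySem.Set.add, hsc, hmem]
      · simp only [List.foldl_cons, hl, if_false]
        exact ih d r h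

lemma pvDist0_values (links : List (String × String × Bool)) :
    ∀ p ∈ (pvDist0 links).items, p.2 = (0 : Int) := by
  unfold pvDist0
  suffices h : ∀ (ls : List (String × String × Bool)) (d : PySem.Dict String Int),
      (∀ p ∈ d.items, p.2 = (0 : Int)) →
      ∀ p ∈ (ls.foldl (fun d l => if l.2.2 then d.insert l.2.1 0 else d) d).items,
        p.2 = (0 : Int) from
    h links PySem.Dict.empty (by simp [PySem.Dict.empty])
  intro ls
  induction ls with
  | nil => intro d h; exact h
  | cons l rest ih =>
      intro d h
      by_cases hl : l.2.2 = true
      · simp only [List.foldl_cons, hl, if_true]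
        apply ih
        intro p hp
        rcases (PySem.Dict.mem_items_insert _ _ _ p).mp hp with h1 | h2
        · rw [h1]
        · exact h p h2.1
      · simp only [List.foldl_cons, hl, if_false]
        exact ih d h

lemma pvDist0_eq_filter (links : List (String × String × Bool)) :
    pvDist0 links
      = (links.filter (fun l => l.2.2)).foldl (fun d l => d.insert l.2.1 0) PySem.Dict.empty := by
  unfold pvDist0
  rw [PySem.List.foldl_if_eq_foldl_filter]

lemma pvDist0_nodup (links : List (String × String × Bool)) : (pvDist0 links).keys.Nodup := by
  rw [pvDist0_eq_filter]
  exact PySem.Dict.nodup_keys_foldl_insert_key (links.filter (fun l => l.2.2))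
    (fun l => l.2.1) (fun _ _ => (0 : Int)) PySem.Dict.empty PySem.Dict.nodup_keys_empty

-- ---------- A's loop = level-synchronized BFS = pvMS ----------

def pvProcess : List String → PySem.Set String → List String × PySem.Set String
  | [], vis => ([], vis)
  | n :: rest, vis =>
    if PySem.Set.contains vis n then pvProcess rest vis
    else
      let p := pvProcess rest (PySem.Set.add vis n)
      (n :: p.1, p.2)

lemma pvProcess_cons_pos (n : String) (rest : List String) (vis : PySem.Set String)
    (h : PySem.Set.contains vis n = true) :
    pvProcess (n :: rest) vis = pvProcess rest vis := by
  rw [pvProcess, if_pos h]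

lemma pvProcess_cons_neg (n : String) (rest : List String) (vis : PySem.Set String)
    (h : PySem.Set.contains vis n = false) :
    pvProcess (n :: rest) vis
      = (n :: (pvProcess rest (PySem.Set.add vis n)).1, (pvProcess rest (PySem.Set.add vis n)).2) := by
  rw [pvProcess, if_neg (by simpa [PySem.Set.contains] using h)]

lemma pvProcess_S (ch : PySem.Dict String (List String)) :
    ∀ (fr : List String) (vis : PySem.Set String),
      pvS ch.items (pvProcess fr vis).2
        + ((pvProcess fr vis).1.flatMap (fun m => PySem.Dict.getD ch m [])).length
      ≤ pvS ch.items vis := by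
  intro fr
  induction fr with
  | nil => intro vis; simp [pvProcess]
  | cons n rest ih =>
      intro vis
      by_cases h : PySem.Set.contains vis n = true
      · rw [pvProcess_cons_pos n rest vis h]; exact ih vis
      · have hfalse : PySem.Set.contains vis n = false := by simp_all
        have h1 := ih (PySem.Set.add vis n)
        have h2 := pvS_add ch vis n hfalse
        rw [pvProcess_cons_neg n rest vis hfalse]
        simp only [List.flatMap_cons, List.length_append]
        omega

-- level-synchronized BFS (proof-side reference loop)
def pvLoopB (ch : PySem.Dict String (List String)) :
    List String → PySem.Set String → Int → Int
  | [], _, depth => depth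
  | n :: rest, vis, depth =>
    let p := pvProcess (n :: rest) vis
    if p.1 = [] then depth
    else pvLoopB ch (p.1.flatMap (fun m => PySem.Dict.getD ch m [])) p.2 (depth + 1)
  termination_by fr vis _ => fr.length + pvS ch.items vis
  decreasing_by
    have := pvProcess_S ch (n :: rest) vis
    simp only [List.length_cons] at *
    omega

lemma pvLoopA_cons_pos (ch : PySem.Dict String (List String)) (node : String) (depth : Int)
    (rest : List (String × Int)) (vis : PySem.Set String) (maxd : Int)
    (h : PySem.Set.contains vis node = true) :
    pvLoopA ch ((node, depth) :: rest) vis maxd = pvLoopA ch rest vis maxd := by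
  rw [pvLoopA, if_pos h]

lemma pvLoopA_cons_neg (ch : PySem.Dict String (List String)) (node : String) (depth : Int)
    (rest : List (String × Int)) (vis : PySem.Set String) (maxd : Int)
    (h : PySem.Set.contains vis node = false) :
    pvLoopA ch ((node, depth) :: rest) vis maxd
      = pvLoopA ch (rest ++ (PySem.Dict.getD ch node []).map (fun c => (c, depth + 1)))
          (PySem.Set.add vis node) (max maxd depth) := by
  rw [pvLoopA, if_neg (by simpa [PySem.Set.contains] using h)]

-- A's queue loop consumes one whole level (cur at depth d, acc the partial next level)
lemma pvL (ch : PySem.Dict String (List String)) :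
    ∀ (cur acc : List String) (vis : PySem.Set String) (maxd d : Int),
      pvLoopA ch (cur.map (fun x => (x, d)) ++ acc.map (fun x => (x, d + 1))) vis maxd
        = pvLoopA ch
            ((acc ++ (pvProcess cur vis).1.flatMap (fun m => PySem.Dict.getD ch m [])).map
              (fun x => (x, d + 1)))
            (pvProcess cur vis).2
            (if (pvProcess cur vis).1 = [] then maxd else max maxd d) := by
  intro cur
  induction cur with
  | nil => intro acc vis maxd d; simp [pvProcess]
  | cons n rest ih =>
      intro acc vis maxd d
      by_cases h : PySem.Set.contains vis n = true
      · simp only [List.map_cons, List.cons_append]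
        rw [pvLoopA_cons_pos ch n d _ vis maxd h]
        rw [ih acc vis maxd d]
        rw [pvProcess_cons_pos n rest vis h]
      · have hfalse : PySem.Set.contains vis n = false := by simp_all
        simp only [List.map_cons, List.cons_append]
        rw [pvLoopA_cons_neg ch n d _ vis maxd hfalse]
        rw [List.append_assoc, ← List.map_append]
        rw [ih (acc ++ PySem.Dict.getD ch n []) (PySem.Set.add vis n) (max maxd d) d]
        rw [pvProcess_cons_neg n rest vis hfalse]
        have hmax : (if (pvProcess rest (PySem.Set.add vis n)).1 = [] then max maxd d
            else max (max maxd d) d) = max maxd d := by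
          split
          · rfl
          · rw [max_assoc, max_self]
        simp only [List.flatMap_cons, reduceCtorEq, if_false, hmax, List.append_assoc]

lemma pvProcess_cons_empty (n : String) (rest : List String) :
    (pvProcess (n :: rest) PySem.Set.empty).1 ≠ [] := by
  rw [pvProcess_cons_neg n rest PySem.Set.empty rfl]
  simp

-- bridge: A's loop started on a whole level at depth d equals the level-synchronized loop
lemma pvBridgeA (ch : PySem.Dict String (List String)) :
    ∀ (k : Nat) (fr : List String) (vis : PySem.Set String) (d : Nat),
      fr.length + pvS ch.items vis ≤ k →
      (d = 0 → vis = PySem.Set.empty ∧ fr ≠ []) →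
      pvLoopA ch (fr.map (fun x => (x, (d : Int)))) vis (if d = 0 then 0 else (d : Int) - 1)
        = pvLoopB ch fr vis ((d : Int) - 1) := by
  intro k
  induction k with
  | zero =>
      intro fr vis d hk h0
      have hfr : fr = [] := by
        cases fr with
        | nil => rfl
        | cons a b => simp at hk
      subst hfr
      have hd : d ≠ 0 := fun hd => (h0 hd).2 rfl
      rw [pvLoopB]
      simp [pvLoopA, hd]
  | succ k ih =>
      intro fr vis d hk h0
      cases fr with
      | nil =>
          have hd : d ≠ 0 := fun hd => (h0 hd).2 rfl
          rw [pvLoopB]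
          simp [pvLoopA, hd]
      | cons n rest =>
          have hL := pvL ch (n :: rest) [] vis (if d = 0 then 0 else (d : Int) - 1) (d : Int)
          simp only [List.map_nil, List.append_nil, List.nil_append] at hL
          rw [hL]
          by_cases hnew : (pvProcess (n :: rest) vis).1 = []
          · have hd : d ≠ 0 := by
              intro hd
              obtain ⟨hvis, -⟩ := h0 hd
              subst hvis
              exact pvProcess_cons_empty n rest hnew
            rw [pvLoopB]
            simp [hnew, pvLoopA, hd]
          · have hmax : (if (pvProcess (n :: rest) vis).1 = [] then
                (if d = 0 then (0 : Int) else (d : Int) - 1) else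
                max (if d = 0 then (0 : Int) else (d : Int) - 1) (d : Int)) = (d : Int) := by
              rw [if_neg hnew]
              by_cases hd : d = 0
              · simp [hd]
              · rw [if_neg hd]
                have : (1 : Int) ≤ (d : Int) := by exact_mod_cast Nat.one_le_iff_ne_zero.mpr hd
                rw [max_eq_right (by omega)]
            rw [hmax]
            have hS := pvProcess_S ch (n :: rest) vis
            have hrec := ih ((pvProcess (n :: rest) vis).1.flatMap (fun m => PySem.Dict.getD ch m []))
              (pvProcess (n :: rest) vis).2 (d + 1)
              (by have h3 := hS; simp only [List.length_cons] at hk; omega)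
              (by intro h; omega)
            have hcast1 : ((d + 1 : Nat) : Int) = (d : Int) + 1 := by push_cast; ring
            rw [hcast1] at hrec
            rw [if_neg (Nat.succ_ne_zero d)] at hrec
            have hcast2 : (d : Int) + 1 - 1 = (d : Int) := by ring
            rw [hcast2] at hrec
            rw [hrec]
            rw [pvLoopB]
            simp [hnew]

lemma pvProcess_mem_fst (n : String) :
    ∀ (fr : List String) (vis : PySem.Set String),
      n ∈ (pvProcess fr vis).1 ↔ (n ∈ fr ∧ n ∉ vis) := by
  intro fr
  induction fr with
  | nil => intro vis; simp [pvProcess]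
  | cons a rest ih =>
      intro vis
      by_cases h : PySem.Set.contains vis a = true
      · have ha : a ∈ vis := (pvMemContains' vis a).mp h
        rw [pvProcess_cons_pos a rest vis h, ih vis]
        simp only [List.mem_cons]
        constructor
        · rintro ⟨h1, h2⟩; exact ⟨Or.inr h1, h2⟩
        · rintro ⟨h1 | h1, h2⟩
          · exact absurd (h1 ▸ ha) h2
          · exact ⟨h1, h2⟩
      · have hf : PySem.Set.contains vis a = false := by simpa using h
        have hna : a ∉ vis := fun hm => by
          rw [(pvMemContains' vis a).mpr hm] at hf; exact Bool.true_eq_false.mp hf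
        rw [pvProcess_cons_neg a rest vis hf]
        simp only [List.mem_cons, ih (PySem.Set.add vis a)]
        have hadd : ∀ m, m ∈ PySem.Set.add vis a ↔ (m ∈ vis ∨ m = a) :=
          fun m => PySem.Set.mem_add vis a m
        rw [hadd n]
        constructor
        · rintro (rfl | ⟨h1, h2⟩)
          · exact ⟨Or.inl rfl, hna⟩
          · exact ⟨Or.inr h1, fun hv => h2 (Or.inl hv)⟩
        · rintro ⟨h1 | h1, h2⟩
          · exact Or.inl h1
          · by_cases hx : n = a
            · exact Or.inl hx
            · exact Or.inr ⟨h1, fun hc => hc.elim h2 hx⟩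

lemma pvProcess_mem_snd (n : String) :
    ∀ (fr : List String) (vis : PySem.Set String),
      n ∈ (pvProcess fr vis).2 ↔ (n ∈ vis ∨ n ∈ fr) := by
  intro fr
  induction fr with
  | nil => intro vis; simp [pvProcess]
  | cons a rest ih =>
      intro vis
      by_cases h : PySem.Set.contains vis a = true
      · have ha : a ∈ vis := (pvMemContains' vis a).mp h
        rw [pvProcess_cons_pos a rest vis h, ih vis]
        simp only [List.mem_cons]
        constructor
        · rintro (h1 | h1)
          · exact Or.inl h1
          · exact Or.inr (Or.inr h1)
        · rintro (h1 | h1 | h1)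
          · exact Or.inl h1
          · exact Or.inl (h1 ▸ ha)
          · exact Or.inr h1
      · have hf : PySem.Set.contains vis a = false := by simpa using h
        rw [pvProcess_cons_neg a rest vis hf]
        simp only [List.mem_cons, ih (PySem.Set.add vis a)]
        have hadd : ∀ m, m ∈ PySem.Set.add vis a ↔ (m ∈ vis ∨ m = a) :=
          fun m => PySem.Set.mem_add vis a m
        rw [hadd n]
        tauto

-- ending case of the level loop: everything reachable is visited, depth k-1 is the answer
lemma pvTermCase (R : List String) (E : List (String × String)) (hR : R ≠ [])
    (vis : PySem.Set String) (k : Nat)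
    (H1 : ∀ n, n ∈ vis ↔ ∃ j, j < k ∧ pvReach R E j n = true)
    (H2' : ∀ n, pvReach R E k n = true ↔ n ∈ vis)
    (hkm : k ≤ pvMS R E + 1) :
    ((k : Int) - 1) = (pvMS R E : Int) := by
  obtain ⟨r, hr⟩ := List.exists_mem_of_ne_nil R hR
  have hr0 : pvReach R E 0 r = true := by simp [pvReach, hr]
  rcases k with _ | j
  · exfalso
    have hv := (H2' r).mp hr0
    rw [H1 r] at hv
    obtain ⟨j, hj, -⟩ := hv
    omega
  · have hst : pvStable R E j := by
      intro n
      cases h1 : pvReach R E (j+1) n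
      · cases h2 : pvReach R E j n
        · rfl
        · exact absurd (pvReach_succ_of R E j n h2) (by simp [h1])
      · have hv := (H2' n).mp h1
        rw [H1 n] at hv
        obtain ⟨i, hi, hri⟩ := hv
        rw [pvReach_le R E (by omega : i ≤ j) hri]
    have h1 : pvMS R E ≤ j := Nat.sInf_le hst
    have h2 : j = pvMS R E := le_antisymm (by omega) h1
    omega

-- the level loop computes the least stable level
lemma pvLoopB_reach (R : List String) (E : List (String × String))
    (ch : PySem.Dict String (List String))
    (hAdj : ∀ s n, n ∈ ch.getD s [] ↔ (s, n) ∈ E) (hR : R ≠ []) :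
    ∀ (fuel : Nat) (fr : List String) (vis : PySem.Set String) (k : Nat),
      fr.length + pvS ch.items vis ≤ fuel →
      (∀ n, n ∈ vis ↔ ∃ j, j < k ∧ pvReach R E j n = true) →
      (∀ n, pvReach R E k n = true ↔ (n ∈ fr ∨ n ∈ vis)) →
      k ≤ pvMS R E + 1 →
      pvLoopB ch fr vis ((k : Int) - 1) = (pvMS R E : Int) := by
  intro fuel
  induction fuel with
  | zero =>
      intro fr vis k hk H1 H2 hkm
      have hfr : fr = [] := by
        cases fr with
        | nil => rfl
        | cons a b => exfalso; simp only [List.length_cons] at hk; omega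
      subst hfr
      rw [pvLoopB]
      exact pvTermCase R E hR vis k H1 (fun n => by rw [H2 n]; simp) hkm
  | succ fuel ih =>
      intro fr vis k hk H1 H2 hkm
      cases fr with
      | nil =>
          rw [pvLoopB]
          exact pvTermCase R E hR vis k H1 (fun n => by rw [H2 n]; simp) hkm
      | cons a rest =>
          rw [pvLoopB]
          show (if (pvProcess (a :: rest) vis).1 = [] then ((k : Int) - 1)
            else pvLoopB ch
              ((pvProcess (a :: rest) vis).1.flatMap (fun m => PySem.Dict.getD ch m []))
              (pvProcess (a :: rest) vis).2 (((k : Int) - 1) + 1)) = (pvMS R E : Int)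
          by_cases hnew : (pvProcess (a :: rest) vis).1 = []
          · rw [if_pos hnew]
            refine pvTermCase R E hR vis k H1 (fun n => ?_) hkm
            rw [H2 n]
            constructor
            · rintro (hfr | hv)
              · by_cases hvn : n ∈ vis
                · exact hvn
                · exact absurd ((pvProcess_mem_fst n (a :: rest) vis).mpr ⟨hfr, hvn⟩)
                    (by simp [hnew])
              · exact hv
            · exact fun hv => Or.inr hv
          · rw [if_neg hnew]
            have hkMS : k ≤ pvMS R E := by
              rcases Nat.lt_or_ge k (pvMS R E + 1) with h | h
              · omega
              · exfalso
                obtain ⟨x, hx⟩ := List.exists_mem_of_ne_nil _ hnew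
                have hx2 := (pvProcess_mem_fst x (a :: rest) vis).mp hx
                have hrk : pvReach R E k x = true := (H2 x).mpr (Or.inl hx2.1)
                have hrm : pvReach R E (pvMS R E) x = true := by
                  have hst := pvStable_ge R E (pvMS_stable R E) (by omega : pvMS R E ≤ k) x
                  rw [hst] at hrk; exact hrk
                exact hx2.2 ((H1 x).mpr ⟨pvMS R E, by omega, hrm⟩)
            have hH1' : ∀ n, n ∈ (pvProcess (a :: rest) vis).2 ↔
                ∃ j, j < k + 1 ∧ pvReach R E j n = true := by
              intro n
              rw [pvProcess_mem_snd n (a :: rest) vis]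
              constructor
              · rintro (hv | hfr)
                · obtain ⟨j, hj, hrj⟩ := (H1 n).mp hv
                  exact ⟨j, by omega, hrj⟩
                · exact ⟨k, by omega, (H2 n).mpr (Or.inl hfr)⟩
              · rintro ⟨j, hj, hrj⟩
                have hrk : pvReach R E k n = true := pvReach_le R E (by omega) hrj
                rcases (H2 n).mp hrk with hfr | hv
                · exact Or.inr hfr
                · exact Or.inl hv
            have hH2' : ∀ n, pvReach R E (k+1) n = true ↔
                (n ∈ (pvProcess (a :: rest) vis).1.flatMap (fun m => PySem.Dict.getD ch m [])
                  ∨ n ∈ (pvProcess (a :: rest) vis).2) := by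
              intro n
              constructor
              · intro hr
                rw [pvReach_succ_eq] at hr
                rcases Bool.or_eq_true_iff.mp hr with hk1 | hany
                · right
                  rw [pvProcess_mem_snd n (a :: rest) vis]
                  rcases (H2 n).mp hk1 with hfr | hv
                  · exact Or.inr hfr
                  · exact Or.inl hv
                · obtain ⟨e, heE, hpe⟩ := List.any_eq_true.mp hany
                  rw [Bool.and_eq_true, decide_eq_true_eq] at hpe
                  obtain ⟨hs, hdst⟩ := hpe
                  have hre : (e.1, n) ∈ E := by rw [← hdst]; simpa using heE
                  by_cases hvv : e.1 ∈ vis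
                  · obtain ⟨j, hj, hrj⟩ := (H1 e.1).mp hvv
                    have hrn := (pvDelta_edge R E hre hrj).1
                    have hrkn : pvReach R E k n = true := pvReach_le R E (by omega) hrn
                    right
                    rw [pvProcess_mem_snd n (a :: rest) vis]
                    rcases (H2 n).mp hrkn with hfr2 | hv2
                    · exact Or.inr hfr2
                    · exact Or.inl hv2
                  · have hfr : e.1 ∈ a :: rest := by
                      rcases (H2 e.1).mp hs with h' | h'
                      · exact h'
                      · exact absurd h' hvv
                    left
                    rw [List.mem_flatMap]
                    exact ⟨e.1, (pvProcess_mem_fst e.1 (a :: rest) vis).mpr ⟨hfr, hvv⟩,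
                      (hAdj e.1 n).mpr hre⟩
              · rintro (hfl | hv2)
                · rw [List.mem_flatMap] at hfl
                  obtain ⟨s, hsmem, hchild⟩ := hfl
                  have hs2 := (pvProcess_mem_fst s (a :: rest) vis).mp hsmem
                  have hrs : pvReach R E k s = true := (H2 s).mpr (Or.inl hs2.1)
                  exact (pvDelta_edge R E ((hAdj s n).mp hchild) hrs).1
                · rw [pvProcess_mem_snd n (a :: rest) vis] at hv2
                  have hrkn : pvReach R E k n = true := by
                    rcases hv2 with hv | hfr
                    · obtain ⟨j, hj, hrj⟩ := (H1 n).mp hv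
                      exact pvReach_le R E (by omega) hrj
                    · exact (H2 n).mpr (Or.inl hfr)
                  exact pvReach_succ_of R E k n hrkn
            have hfuel : ((pvProcess (a :: rest) vis).1.flatMap
                  (fun m => PySem.Dict.getD ch m [])).length
                + pvS ch.items (pvProcess (a :: rest) vis).2 ≤ fuel := by
              have hS := pvProcess_S ch (a :: rest) vis
              simp only [List.length_cons] at hk
              omega
            have hrec := ih ((pvProcess (a :: rest) vis).1.flatMap
                (fun m => PySem.Dict.getD ch m []))
              (pvProcess (a :: rest) vis).2 (k+1) hfuel hH1' hH2' (by omega)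
            have hd : ((k+1 : Nat) : Int) - 1 = ((k : Int) - 1) + 1 := by push_cast; ring
            rw [hd] at hrec
            exact hrec

-- ---------- Bellman-Ford = pvMS ----------

lemma pvRelax_none (d : PySem.Dict String Int) (e : String × String)
    (h1 : d.get? e.1 = none) : pvRelax d e = d := by
  simp [pvRelax, h1]

lemma pvRelax_new (d : PySem.Dict String Int) (e : String × String) (w : Int)
    (h1 : d.get? e.1 = some w) (h2 : d.get? e.2 = none) :
    pvRelax d e = d.insert e.2 (w + 1) := by
  simp [pvRelax, h1, h2]

lemma pvRelax_old (d : PySem.Dict String Int) (e : String × String) (w u : Int)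
    (h1 : d.get? e.1 = some w) (h2 : d.get? e.2 = some u) :
    pvRelax d e = if w + 1 < u then d.insert e.2 (w + 1) else d := by
  simp [pvRelax, h1, h2]

lemma pvRelax_le (d : PySem.Dict String Int) (e : String × String) (n : String) (v : Int)
    (h : d.get? n = some v) :
    ∃ v', (pvRelax d e).get? n = some v' ∧ v' ≤ v := by
  rcases h1 : d.get? e.1 with _ | w
  · rw [pvRelax_none d e h1]
    exact ⟨v, h, le_refl v⟩
  · rcases h2 : d.get? e.2 with _ | u
    · rw [pvRelax_new d e w h1 h2]
      by_cases hn : n = e.2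
      · exfalso; rw [hn, h2] at h; cases h
      · rw [PySem.Dict.get?_insert_of_ne d (w+1) hn]
        exact ⟨v, h, le_refl v⟩
    · rw [pvRelax_old d e w u h1 h2]
      by_cases hw : w + 1 < u
      · rw [if_pos hw]
        by_cases hn : n = e.2
        · subst hn
          rw [h2] at h
          injection h with hv
          rw [PySem.Dict.get?_insert_self d e.2 (w+1)]
          exact ⟨w + 1, rfl, by omega⟩
        · rw [PySem.Dict.get?_insert_of_ne d (w+1) hn]
          exact ⟨v, h, le_refl v⟩
      · rw [if_neg hw]
        exact ⟨v, h, le_refl v⟩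

lemma pvRelax_nodup (d : PySem.Dict String Int) (e : String × String)
    (h : d.keys.Nodup) : (pvRelax d e).keys.Nodup := by
  rcases h1 : d.get? e.1 with _ | w
  · rw [pvRelax_none d e h1]; exact h
  · rcases h2 : d.get? e.2 with _ | u
    · rw [pvRelax_new d e w h1 h2]; exact PySem.Dict.nodup_keys_insert d e.2 (w+1) h
    · rw [pvRelax_old d e w u h1 h2]
      by_cases hw : w + 1 < u
      · rw [if_pos hw]; exact PySem.Dict.nodup_keys_insert d e.2 (w+1) h
      · rw [if_neg hw]; exact h

lemma pvFold_le (l : List (String × String)) :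
    ∀ (d : PySem.Dict String Int) (n : String) (v : Int), d.get? n = some v →
      ∃ v', (l.foldl pvRelax d).get? n = some v' ∧ v' ≤ v := by
  induction l with
  | nil => exact fun d n v h => ⟨v, h, le_refl v⟩
  | cons e rest ih =>
      intro d n v h
      obtain ⟨v1, h1, hle1⟩ := pvRelax_le d e n v h
      obtain ⟨v2, h2, hle2⟩ := ih (pvRelax d e) n v1 h1
      exact ⟨v2, by simpa using h2, le_trans hle2 hle1⟩

lemma pvFold_nodup (l : List (String × String)) :
    ∀ (d : PySem.Dict String Int), d.keys.Nodup → (l.foldl pvRelax d).keys.Nodup := by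
  induction l with
  | nil => exact fun d h => h
  | cons e rest ih =>
      intro d h
      simpa using ih (pvRelax d e) (pvRelax_nodup d e h)

def pvSound (R : List String) (E : List (String × String)) (d : PySem.Dict String Int) : Prop :=
  ∀ n v, d.get? n = some v →
    pvReach R E (pvMS R E) n = true ∧ ((pvDelta R E n : Int) ≤ v)

def pvCompl (R : List String) (E : List (String × String)) (k : Nat)
    (d : PySem.Dict String Int) : Prop :=
  ∀ n, pvReach R E k n = true → ∃ v, d.get? n = some v ∧ v ≤ (pvDelta R E n : Int)

lemma pvRelax_sound (R : List String) (E : List (String × String)) (e : String × String)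
    (heE : e ∈ E) (d : PySem.Dict String Int) (h : pvSound R E d) :
    pvSound R E (pvRelax d e) := by
  intro n v hget
  rcases h1 : d.get? e.1 with _ | w
  · rw [pvRelax_none d e h1] at hget; exact h n v hget
  · have hs1 := h e.1 w h1
    have hre : (e.1, e.2) ∈ E := by simpa using heE
    have hedge := pvDelta_edge R E hre (pvDelta_reach R E hs1.1)
    have hkey : pvReach R E (pvMS R E) e.2 = true ∧ ((pvDelta R E e.2 : Int) ≤ w + 1) := by
      refine ⟨pvReach_any_MS R E hedge.1, ?_⟩
      have hc : (pvDelta R E e.2 : Int) ≤ (pvDelta R E e.1 : Int) + 1 := by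
        exact_mod_cast hedge.2
      have := hs1.2
      omega
    rcases h2 : d.get? e.2 with _ | u
    · rw [pvRelax_new d e w h1 h2] at hget
      by_cases hn : n = e.2
      · subst hn
        rw [PySem.Dict.get?_insert_self d e.2 (w+1)] at hget
        injection hget with hv
        exact ⟨hkey.1, by rw [← hv]; exact hkey.2⟩
      · rw [PySem.Dict.get?_insert_of_ne d (w+1) hn] at hget
        exact h n v hget
    · rw [pvRelax_old d e w u h1 h2] at hget
      by_cases hw : w + 1 < u
      · rw [if_pos hw] at hget
        by_cases hn : n = e.2
        · subst hn
          rw [PySem.Dict.get?_insert_self d e.2 (w+1)] at hget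
          injection hget with hv
          exact ⟨hkey.1, by rw [← hv]; exact hkey.2⟩
        · rw [PySem.Dict.get?_insert_of_ne d (w+1) hn] at hget
          exact h n v hget
      · rw [if_neg hw] at hget
        exact h n v hget

lemma pvFold_sound (R : List String) (E : List (String × String)) :
    ∀ (l : List (String × String)), (∀ e ∈ l, e ∈ E) →
      ∀ (d : PySem.Dict String Int), pvSound R E d → pvSound R E (l.foldl pvRelax d) := by
  intro l
  induction l with
  | nil => exact fun _ d h => h
  | cons e rest ih =>
      intro hsub d h
      have h1 : pvSound R E (pvRelax d e) := pvRelax_sound R E e (hsub e List.mem_cons_self) d h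
      simpa using ih (fun x hx => hsub x (List.mem_cons_of_mem e hx)) (pvRelax d e) h1

lemma pvPass_edge :
    ∀ (l : List (String × String)) (d : PySem.Dict String Int) (st t : String) (v : Int),
      (st, t) ∈ l → d.get? st = some v →
      ∃ w, (l.foldl pvRelax d).get? t = some w ∧ w ≤ v + 1 := by
  intro l
  induction l with
  | nil => intro d st t v h; exact absurd h (List.not_mem_nil)
  | cons e rest ih =>
      intro d st t v hmem hget
      rcases List.mem_cons.mp hmem with heq | htail
      · have hcur : ∃ w0, (pvRelax d e).get? t = some w0 ∧ w0 ≤ v + 1 := by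
          rw [← heq]
          have h1 : d.get? (st, t).1 = some v := hget
          rcases h2 : d.get? (st, t).2 with _ | u
          · rw [pvRelax_new d (st, t) v h1 h2]
            exact ⟨v + 1, PySem.Dict.get?_insert_self d t (v+1), le_refl _⟩
          · rw [pvRelax_old d (st, t) v u h1 h2]
            by_cases hw : v + 1 < u
            · rw [if_pos hw]
              exact ⟨v + 1, PySem.Dict.get?_insert_self d t (v+1), le_refl _⟩
            · rw [if_neg hw]
              exact ⟨u, h2, by omega⟩
        obtain ⟨w0, hw0, hw0le⟩ := hcur
        obtain ⟨w, hw, hwle⟩ := pvFold_le rest (pvRelax d e) t w0 hw0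
        exact ⟨w, by simpa using hw, by omega⟩
      · obtain ⟨v1, h1, hle1⟩ := pvRelax_le d e st v hget
        obtain ⟨w, hw, hwle⟩ := ih (pvRelax d e) st t v1 htail h1
        exact ⟨w, by simpa using hw, by omega⟩

lemma pvPass_compl (R : List String) (E : List (String × String)) (k : Nat)
    (d : PySem.Dict String Int) (h : pvCompl R E k d) :
    pvCompl R E (k+1) (E.foldl pvRelax d) := by
  intro n hr
  by_cases hrk : pvReach R E k n = true
  · obtain ⟨v, hv, hvle⟩ := h n hrk
    obtain ⟨v', hv', hle'⟩ := pvFold_le E d n v hv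
    exact ⟨v', hv', le_trans hle' hvle⟩
  · have hf : pvReach R E k n = false := by simpa using hrk
    have hdgt : k < pvDelta R E n := by
      by_contra hc
      push_neg at hc
      have hcontra := pvReach_le R E hc (pvDelta_reach R E hr)
      rw [hf] at hcontra
      cases hcontra
    rw [pvReach_succ_eq] at hr
    rcases Bool.or_eq_true_iff.mp hr with h1 | hany
    · rw [hf] at h1; cases h1
    · obtain ⟨e, heE, hpe⟩ := List.any_eq_true.mp hany
      rw [Bool.and_eq_true, decide_eq_true_eq] at hpe
      obtain ⟨hs, hdst⟩ := hpe
      obtain ⟨v, hv, hvle⟩ := h e.1 hs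
      have hδs : pvDelta R E e.1 ≤ k := pvDelta_le R E hs
      have he2 : (e.1, n) ∈ E := by rw [← hdst]; simpa using heE
      obtain ⟨w, hw, hwle⟩ := pvPass_edge E d e.1 n v he2 hv
      refine ⟨w, hw, ?_⟩
      have hc1 : (pvDelta R E e.1 : Int) ≤ (k : Int) := by exact_mod_cast hδs
      have hc2 : (k : Int) + 1 ≤ (pvDelta R E n : Int) := by exact_mod_cast hdgt
      omega

lemma pvIter (R : List String) (E : List (String × String)) (N : Nat)
    (d : PySem.Dict String Int) (hS : pvSound R E d) (hC : pvCompl R E 0 d)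
    (hν : d.keys.Nodup) :
    pvSound R E ((List.range N).foldl (fun d _ => E.foldl pvRelax d) d)
    ∧ pvCompl R E N ((List.range N).foldl (fun d _ => E.foldl pvRelax d) d)
    ∧ ((List.range N).foldl (fun d _ => E.foldl pvRelax d) d).keys.Nodup := by
  induction N with
  | zero => simpa using ⟨hS, hC, hν⟩
  | succ N ih =>
      obtain ⟨h1, h2, h3⟩ := ih
      rw [List.range_succ, List.foldl_append]
      simp only [List.foldl_cons, List.foldl_nil]
      exact ⟨pvFold_sound R E E (fun _ he => he) _ h1, pvPass_compl R E N _ h2,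
        pvFold_nodup E _ h3⟩

lemma pvBF (R : List String) (E : List (String × String)) (dist0 : PySem.Dict String Int)
    (hget : ∀ n, dist0.get? n = if n ∈ R then some 0 else none)
    (hnd : dist0.keys.Nodup) (hR : R ≠ []) :
    PySem.List.max? ((List.range E.length).foldl (fun d _ => E.foldl pvRelax d) dist0).values
      (fun v => v) = some ((pvMS R E : Nat) : Int) := by
  have hS0 : pvSound R E dist0 := by
    intro n v h
    rw [hget n] at h
    by_cases hn : n ∈ R
    · rw [if_pos hn] at h
      injection h with hv
      have hr0 : pvReach R E 0 n = true := by simp [pvReach, hn]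
      refine ⟨pvReach_any_MS R E hr0, ?_⟩
      have hd0 : pvDelta R E n ≤ 0 := pvDelta_le R E hr0
      have : (pvDelta R E n : Int) ≤ 0 := by exact_mod_cast hd0
      omega
    · rw [if_neg hn] at h; cases h
  have hC0 : pvCompl R E 0 dist0 := by
    intro n hr
    have hn : n ∈ R := by simpa [pvReach] using hr
    exact ⟨0, by rw [hget n, if_pos hn], by exact_mod_cast Nat.zero_le _⟩
  obtain ⟨hS, hC, hnd'⟩ := pvIter R E E.length dist0 hS0 hC0 hnd
  have hval : ∀ v, v ∈ ((List.range E.length).foldl (fun d _ => E.foldl pvRelax d) dist0).values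
      ↔ ∃ n, ((List.range E.length).foldl (fun d _ => E.foldl pvRelax d) dist0).get? n
          = some v := by
    intro v
    constructor
    · intro hv
      obtain ⟨p, hp, hpv⟩ := List.mem_map.mp hv
      refine ⟨p.1, ?_⟩
      rw [← hpv]
      exact PySem.Dict.get?_of_mem_items _ (by simpa using hp) hnd'
    · rintro ⟨n, hn⟩
      have hmem := PySem.Dict.mem_items_of_get?_eq_some _ hn
      exact List.mem_map.mpr ⟨(n, v), hmem, rfl⟩
  have hreachE : ∀ n, pvReach R E (pvMS R E) n = true → pvReach R E E.length n = true :=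
    fun n h => pvReach_le R E (pvMS_le R E) h
  have hub : ∀ v ∈ ((List.range E.length).foldl (fun d _ => E.foldl pvRelax d) dist0).values,
      v ≤ ((pvMS R E : Nat) : Int) := by
    intro v hv
    obtain ⟨n, hn⟩ := (hval v).mp hv
    obtain ⟨hrm, hδv⟩ := hS n v hn
    obtain ⟨u, hu, hule⟩ := hC n (hreachE n hrm)
    rw [hn] at hu
    injection hu with huv
    have hδm : pvDelta R E n ≤ pvMS R E := pvDelta_le_MS R E hrm
    have h1 : (pvDelta R E n : Int) ≤ ((pvMS R E : Nat) : Int) := by exact_mod_cast hδm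
    omega
  have hmemMS : ((pvMS R E : Nat) : Int)
      ∈ ((List.range E.length).foldl (fun d _ => E.foldl pvRelax d) dist0).values := by
    obtain ⟨n, hrm, hδ⟩ := pvMS_attained R E hR
    obtain ⟨u, hu, hule⟩ := hC n (hreachE n hrm)
    obtain ⟨hrm2, hδu⟩ := hS n u hu
    have h1 : (pvDelta R E n : Int) = ((pvMS R E : Nat) : Int) := by exact_mod_cast hδ
    have hv : u = ((pvMS R E : Nat) : Int) := by omega
    rw [← hv]
    exact (hval u).mpr ⟨n, hu⟩
  cases hmx : PySem.List.max?
      ((List.range E.length).foldl (fun d _ => E.foldl pvRelax d) dist0).values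
      (fun v => v) with
  | none =>
      exfalso
      rw [PySem.List.max?_eq_none_iff] at hmx
      rw [hmx] at hmemMS
      exact absurd hmemMS (List.not_mem_nil)
  | some x =>
      have hx := PySem.List.max?_mem hmx
      have hmax := PySem.List.max?_isMax hmx
      have h1 : x ≤ ((pvMS R E : Nat) : Int) := hub x hx
      have h2 : ((pvMS R E : Nat) : Int) ≤ x := hmax _ hmemMS
      rw [le_antisymm h1 h2]

lemma pvDist0_get? (links : List (String × String × Bool)) :
    ∀ n, (pvDist0 links).get? n = if n ∈ pvRts links then some 0 else none := by
  intro n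
  by_cases hn : n ∈ pvRts links
  · rw [if_pos hn]
    have hk : n ∈ (pvDist0 links).keys := by rw [pvDist0_keys]; exact hn
    have hc : (pvDist0 links).contains n = true :=
      (PySem.Dict.contains_iff_mem_keys _ n).mpr hk
    have hs : ((pvDist0 links).get? n).isSome := by
      rw [← PySem.Dict.contains_eq_isSome_get?]; exact hc
    obtain ⟨v, hv⟩ := Option.isSome_iff_exists.mp hs
    have hv0 : v = 0 :=
      pvDist0_values links (n, v) (PySem.Dict.mem_items_of_get?_eq_some _ hv)
    rw [hv, hv0]
  · rw [if_neg hn]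
    rw [PySem.Dict.get?_eq_none_iff_not_mem_keys]
    rw [pvDist0_keys]
    exact hn

-- ===== VERDICT (by name: the statement is the Claim_ definition above) =====
theorem calc_redelegation_depth_spec : Claim_equal_calc_redelegation_depth := by
  unfold Claim_equal_calc_redelegation_depth
  intro links _
  unfold Spec_calc_redelegation_depth
  show calc_redelegation_depth links = calc_redelegation_depth_alt links
  rw [calc_redelegation_depth, calc_redelegation_depth_alt]
  show (if (links.foldl
        (fun (st : PySem.Dict String (List String) × PySem.Set String) l =>
          if l.2.2 then (st.1, PySem.Set.add st.2 l.2.1)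
          else (st.1.modify l.1 [] (· ++ [l.2.1]), st.2))
        (PySem.Dict.empty, PySem.Set.empty)).2 = [] then (0 : Int)
      else pvLoopA (links.foldl
        (fun (st : PySem.Dict String (List String) × PySem.Set String) l =>
          if l.2.2 then (st.1, PySem.Set.add st.2 l.2.1)
          else (st.1.modify l.1 [] (· ++ [l.2.1]), st.2))
        (PySem.Dict.empty, PySem.Set.empty)).1
        ((links.foldl
        (fun (st : PySem.Dict String (List String) × PySem.Set String) l =>
          if l.2.2 then (st.1, PySem.Set.add st.2 l.2.1)
          else (st.1.modify l.1 [] (· ++ [l.2.1]), st.2))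
        (PySem.Dict.empty, PySem.Set.empty)).2.map (fun r => (r, (0 : Int))))
        PySem.Set.empty 0)
    = (if (links.foldl
        (fun (st : PySem.Dict String Int × List (String × String)) l =>
          if l.2.2 then (st.1.insert l.2.1 0, st.2)
          else (st.1, st.2 ++ [(l.1, l.2.1)]))
        (PySem.Dict.empty, [])).1.items = [] then (0 : Int)
      else (PySem.List.max? ((List.range (links.foldl
        (fun (st : PySem.Dict String Int × List (String × String)) l =>
          if l.2.2 then (st.1.insert l.2.1 0, st.2)
          else (st.1, st.2 ++ [(l.1, l.2.1)]))
        (PySem.Dict.empty, [])).2.length).foldl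
          (fun d _ => (links.foldl
        (fun (st : PySem.Dict String Int × List (String × String)) l =>
          if l.2.2 then (st.1.insert l.2.1 0, st.2)
          else (st.1, st.2 ++ [(l.1, l.2.1)]))
        (PySem.Dict.empty, [])).2.foldl pvRelax d)
          (links.foldl
        (fun (st : PySem.Dict String Int × List (String × String)) l =>
          if l.2.2 then (st.1.insert l.2.1 0, st.2)
          else (st.1, st.2 ++ [(l.1, l.2.1)]))
        (PySem.Dict.empty, [])).1).values (fun v => v)).getD 0)
  rw [pvSplitA, pvSplitB]
  dsimp only
  have hcond : ((pvDist0 links).items = []) ↔ (pvRts links = []) := by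
    have hkeys : (pvDist0 links).keys = (pvDist0 links).items.map (·.1) := rfl
    constructor
    · intro h
      rw [← pvDist0_keys, hkeys, h]
      rfl
    · intro h
      have h2 : (pvDist0 links).items.map (·.1) = [] := by
        rw [← hkeys, pvDist0_keys, h]
      exact List.map_eq_nil_iff.mp h2
  by_cases hr : pvRts links = []
  · rw [if_pos hr, if_pos (hcond.mpr hr)]
  · rw [if_neg hr, if_neg (fun h => hr (hcond.mp h))]
    have hA2 : pvLoopA (pvChA links) ((pvRts links).map (fun x => (x, (0 : Int))))
        PySem.Set.empty 0
        = pvLoopB (pvChA links) (pvRts links) PySem.Set.empty (-1) :=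
      pvBridgeA (pvChA links)
        ((pvRts links).length + pvS (pvChA links).items PySem.Set.empty)
        (pvRts links) PySem.Set.empty 0 (le_refl _) (fun _ => ⟨rfl, hr⟩)
    have hB2 : pvLoopB (pvChA links) (pvRts links) PySem.Set.empty (-1)
        = ((pvMS (pvRts links) (pvEdges links) : Nat) : Int) :=
      pvLoopB_reach (pvRts links) (pvEdges links) (pvChA links)
        (fun s n => pvAdj links s n) hr
        ((pvRts links).length + pvS (pvChA links).items PySem.Set.empty)
        (pvRts links) PySem.Set.empty 0 (le_refl _)
        (fun n => by simp [PySem.Set.empty])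
        (fun n => by simp [pvReach, PySem.Set.empty])
        (by omega)
    have hD := pvBF (pvRts links) (pvEdges links) (pvDist0 links)
      (pvDist0_get? links) (pvDist0_nodup links) hr
    rw [hA2, hB2, hD]
    rfl
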